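-- pv_equiv track=rewrite | github.com/Ascend/modelzoo | built-in/TensorFlow/Research/recommendation/DeepFM_for_TensorFlow/deepfm/tf_util.py | get_field_index
-- ===== SOURCE A (Python) =====
-- def get_field_index(multi_hot_flags):
--     """infer field index of each column using `multi_hot_flags`
--     Example:
--     get_field_index([False,False,True,True,True,False])  # [0,1,2,2,2,3]
--     """
--     field_indices = []
--     cur_field_index = 0
--     for i, flag in enumerate(multi_hot_flags):
--         field_indices.append(cur_field_index)
--         if not flag or (
--                 flag and (i+1 < len(multi_hot_flags))
--                 and not multi_hot_flags[i+1]):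
--             cur_field_index += 1
--     return field_indices
-- ===== SOURCE B (Python) =====
-- def get_field_index(multi_hot_flags):
--     """infer field index of each column by scanning maximal runs:
--     a run of consecutive True flags is one multi-hot field; each False
--     flag is a field of its own."""
--     field_indices = []
--     cur_field_index = 0
--     i = 0
--     n = len(multi_hot_flags)
--     while i < n:
--         if multi_hot_flags[i]:
--             j = i
--             while j < n and multi_hot_flags[j]:
--                 j += 1
--             field_indices.extend([cur_field_index] * (j - i))
--             i = j
--         else:
--             field_indices.append(cur_field_index)
--             i += 1
--         cur_field_index += 1
--     return field_indices
-- ===== Notes on version B (the rewrite author's own statement) =====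
-- stated objective: alternative
-- what changed: B scans the flags as maximal runs (a run of consecutive True flags is one field, each False its own field) with a while loop over indices, instead of A's element-wise look-ahead with an i+1 bounds guard inside an enumerate loop.
import Mathlib
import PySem

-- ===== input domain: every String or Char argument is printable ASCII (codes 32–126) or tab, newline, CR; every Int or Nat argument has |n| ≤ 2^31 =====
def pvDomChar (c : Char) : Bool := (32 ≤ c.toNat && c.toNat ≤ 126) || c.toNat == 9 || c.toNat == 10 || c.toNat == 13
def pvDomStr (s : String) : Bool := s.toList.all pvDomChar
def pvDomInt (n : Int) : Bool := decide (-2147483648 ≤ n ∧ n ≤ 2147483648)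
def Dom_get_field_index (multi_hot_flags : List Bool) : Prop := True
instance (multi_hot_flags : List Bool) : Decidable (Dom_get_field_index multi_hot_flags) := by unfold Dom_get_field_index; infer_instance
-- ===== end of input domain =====

-- B is an alternative decomposition: it scans the flags as maximal runs (one field per
-- True-run, one field per False flag) instead of A's element-wise look-ahead; return values are equal.

-- ===== PORT A =====
-- literal port of A: enumerate loop, append current index, increment on the guarded look-ahead test
def get_field_index (multi_hot_flags : List Bool) : List Int :=
  ((PySem.List.enumerate multi_hot_flags 0).foldl
    (fun (st : List Int × Int) (p : Int × Bool) =>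
      let field_indices := st.1 ++ [st.2]
      let cur_field_index :=
        if (!p.2) || (p.2 && decide (p.1 + 1 < (multi_hot_flags.length : Int))
              && !((PySem.List.pyGet? multi_hot_flags (p.1 + 1)).getD false)) then
          st.2 + 1
        else st.2
      (field_indices, cur_field_index))
    ([], 0)).1

-- ===== PORT B =====
-- B's outer while-loop over run starts: a True at position i is extended to its maximal run
-- (the inner `while j < n and multi_hot_flags[j]` scan = takeWhile/dropWhile on the tail),
-- emitting the run's length copies of the current field index; a False emits one copy.
def get_field_index_alt_go (cur_field_index : Int) (flags : List Bool) : List Int :=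
  match flags with
  | [] => []
  | true :: rest =>
      List.replicate ((rest.takeWhile (· = true)).length + 1) cur_field_index ++
        get_field_index_alt_go (cur_field_index + 1) (rest.dropWhile (· = true))
  | false :: rest => cur_field_index :: get_field_index_alt_go (cur_field_index + 1) rest
termination_by flags.length
decreasing_by
  · exact Nat.lt_succ_of_le (List.length_dropWhile_le _ _)
  · simp

def get_field_index_alt (multi_hot_flags : List Bool) : List Int :=
  get_field_index_alt_go 0 multi_hot_flags

-- ===== PRECONDITION & SPEC =====
def Spec_get_field_index (multi_hot_flags : List Bool) (out : List Int) : Prop := out = get_field_index_alt multi_hot_flags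
instance (multi_hot_flags : List Bool) (out : List Int) : Decidable (Spec_get_field_index multi_hot_flags out) := by unfold Spec_get_field_index; infer_instance

-- ===== CLAIM (what is proved, stated in full; the proofs are below) =====
def Claim_equal_get_field_index : Prop := ∀ (multi_hot_flags : List Bool), Dom_get_field_index multi_hot_flags → Spec_get_field_index multi_hot_flags (get_field_index multi_hot_flags)

-- ===== LEMMAS AND PROOFS =====

-- element-wise recursive characterisation of A's loop
def aGo (c : Int) : List Bool → List Int
  | [] => []
  | [_] => [c]
  | f :: g :: rest => c :: aGo (if (!f) || (f && !g) then c + 1 else c) (g :: rest)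

theorem altGo_nil (c : Int) : get_field_index_alt_go c [] = [] := by
  rw [get_field_index_alt_go]

theorem altGo_false (c : Int) (r : List Bool) :
    get_field_index_alt_go c (false :: r) = c :: get_field_index_alt_go (c + 1) r := by
  rw [get_field_index_alt_go]

theorem altGo_true (c : Int) (r : List Bool) :
    get_field_index_alt_go c (true :: r) =
      List.replicate ((r.takeWhile (· = true)).length + 1) c ++
        get_field_index_alt_go (c + 1) (r.dropWhile (· = true)) := by
  rw [get_field_index_alt_go]

theorem aGo_eq_altGo (c : Int) (l : List Bool) :
    aGo c l = get_field_index_alt_go c l := by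
  match l with
  | [] => simp [aGo, altGo_nil]
  | [true] => simp [aGo, altGo_true, altGo_nil]
  | [false] => simp [aGo, altGo_false, altGo_nil]
  | true :: true :: rest =>
      have ih := aGo_eq_altGo c (true :: rest)
      simp only [aGo, Bool.not_true, Bool.and_false, Bool.or_self, Bool.false_eq_true, if_false]
      rw [ih, altGo_true, altGo_true]
      simp [List.replicate_succ]
  | true :: false :: rest =>
      have ih := aGo_eq_altGo (c + 1) (false :: rest)
      simp only [aGo, Bool.not_true, Bool.not_false, Bool.and_true, Bool.false_or, if_true]
      rw [altGo_true, ih]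
      simp
  | false :: g :: rest =>
      have ih := aGo_eq_altGo (c + 1) (g :: rest)
      simp only [aGo, Bool.not_false, Bool.true_or, if_true]
      rw [altGo_false, ih]
termination_by l.length
decreasing_by all_goals simp

theorem foldl_eq_aGo (flags : List Bool) (l : List Bool) (k : Nat) (acc : List Int) (c : Int)
    (h : flags.drop k = l) :
    ((PySem.List.enumerate l (k : Int)).foldl
      (fun (st : List Int × Int) (p : Int × Bool) =>
        let field_indices := st.1 ++ [st.2]
        let cur_field_index :=
          if (!p.2) || (p.2 && decide (p.1 + 1 < (flags.length : Int))
                && !((PySem.List.pyGet? flags (p.1 + 1)).getD false)) then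
            st.2 + 1
          else st.2
        (field_indices, cur_field_index))
      (acc, c)).1 = acc ++ aGo c l := by
  induction l generalizing k acc c with
  | nil => simp [PySem.List.enumerate_nil, aGo]
  | cons f t ih =>
    rw [PySem.List.enumerate_cons]
    have hdrop : flags.drop (k + 1) = t := by
      rw [← List.tail_drop, h]
      rfl
    have hk : (k : Int) + 1 = ((k + 1 : Nat) : Int) := by push_cast; ring
    match t with
    | [] =>
      simp [PySem.List.enumerate_nil, aGo]
    | g :: t' =>
      have hget : flags[k + 1]? = some g := by
        have h1 : (flags.drop k)[1]? = flags[k + 1]? := by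
          rw [List.getElem?_drop]
        rw [h] at h1
        simpa using h1.symm
      have hlen : k + 1 < flags.length := (List.getElem?_eq_some_iff.mp hget).1
      have step1 : ((k : Int) + 1 < (flags.length : Int)) := by exact_mod_cast hlen
      have hpy : PySem.List.pyGet? flags ((k : Int) + 1) = some g := by
        rw [hk, PySem.List.pyGet?_natCast, hget]
      simp only [List.foldl_cons, hk]
      rw [ih (k + 1) _ _ hdrop]
      simp only [aGo, ← hk, hpy, step1]
      simp [List.append_assoc]

theorem get_field_index_eq_aGo (multi_hot_flags : List Bool) :
    get_field_index multi_hot_flags = aGo 0 multi_hot_flags := by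
  unfold get_field_index
  have := foldl_eq_aGo multi_hot_flags multi_hot_flags 0 [] 0 (by simp)
  simpa using this

-- ===== VERDICT (by name: the statement is the Claim_ definition above) =====
theorem get_field_index_spec : Claim_equal_get_field_index := by
  intro l _
  unfold Spec_get_field_index get_field_index_alt
  rw [get_field_index_eq_aGo, aGo_eq_altGo]
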